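-- pv_equiv track=rewrite | github.com/binchoi/study | python/01-20-patterns/01-sliding-window/395-longest-substring-w-min-k-repeating-char.py | _get_bad_char_set
-- ===== SOURCE A (Python) =====
-- from typing import List, Set
--
-- def _get_bad_char_set(s: str, k: int) -> Set[str]:
--     freq_map = {}
--     for c in s:
--         freq_map[c] = freq_map.get(c, 0) + 1
--
--     res = set()
--     for key, val in freq_map.items():
--         if val < k:
--             res.add(key)
--     return res
-- ===== SOURCE B (Python) =====
-- from typing import Set
--
-- def _get_bad_char_set(s: str, k: int) -> Set[str]:
--     # Single pass: maintain the answer set online — add a char while its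
--     # running count is below k, evict it the moment the count reaches k.
--     count = {}
--     bad = set()
--     for c in s:
--         n = count.get(c, 0) + 1
--         count[c] = n
--         if n < k:
--             bad.add(c)
--         else:
--             bad.discard(c)
--     return bad
-- ===== Notes on version B (the rewrite author's own statement) =====
-- stated objective: alternative
-- what changed: Replaces A's two staged passes (build a full frequency map, then scan its items filtering count < k) with a single streaming pass that maintains the answer set online, adding a char while its running count is below k and evicting it the moment the count reaches k.
import Mathlib
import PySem

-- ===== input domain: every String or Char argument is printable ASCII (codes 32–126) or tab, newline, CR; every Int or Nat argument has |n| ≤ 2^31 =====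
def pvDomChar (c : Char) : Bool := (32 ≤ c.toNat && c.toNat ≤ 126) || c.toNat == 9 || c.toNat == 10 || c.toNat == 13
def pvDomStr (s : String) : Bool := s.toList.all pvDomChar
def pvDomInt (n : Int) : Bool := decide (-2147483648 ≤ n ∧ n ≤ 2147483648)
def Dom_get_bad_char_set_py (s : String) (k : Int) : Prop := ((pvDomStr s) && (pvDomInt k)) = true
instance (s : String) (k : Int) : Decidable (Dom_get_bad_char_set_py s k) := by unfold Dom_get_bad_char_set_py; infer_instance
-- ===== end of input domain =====

-- B replaces A's two staged passes (build a frequency map, then scan its items)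
-- with one streaming pass maintaining the answer set online; objective: alternative.

-- ===== PORT A =====
-- builds a frequency dict over s, then scans its items collecting keys with count < k
def get_bad_char_set_py (s : String) (k : Int) : List String :=
  let freq_map : PySem.Dict String Int :=
    (s.toList.map Char.toString).foldl
      (fun d c => d.insert c (d.getD c 0 + 1)) PySem.Dict.empty
  freq_map.items.foldl
    (fun r kv => if kv.2 < k then PySem.Set.add r kv.1 else r)
    PySem.Set.empty

-- ===== PORT B =====
-- single loop carrying (count, bad): n = count.get(c,0)+1; count[c] = n;
-- if n < k: bad.add(c) else: bad.discard(c); returns bad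
def get_bad_char_set_py_alt (s : String) (k : Int) : List String :=
  ((s.toList.map Char.toString).foldl
    (fun (st : PySem.Dict String Int × List String) c =>
      let n := st.1.getD c 0 + 1
      (st.1.insert c n,
       if n < k then PySem.Set.add st.2 c else PySem.Set.discard st.2 c))
    (PySem.Dict.empty, PySem.Set.empty)).2

-- ===== PRECONDITION & SPEC =====
def Spec_get_bad_char_set_py (s : String) (k : Int) (out : List String) : Prop := out = get_bad_char_set_py_alt s k
instance (s : String) (k : Int) (out : List String) : Decidable (Spec_get_bad_char_set_py s k out) := by unfold Spec_get_bad_char_set_py; infer_instance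

-- ===== CLAIM (what is proved, stated in full; the proofs are below) =====
def Claim_equal_get_bad_char_set_py : Prop := ∀ (s : String) (k : Int), Dom_get_bad_char_set_py s k → Spec_get_bad_char_set_py s k (get_bad_char_set_py s k)

-- ===== LEMMAS AND PROOFS =====

-- a 'if p x then add else skip' fold is a fold of add over the filtered list
lemma foldl_if_add {α : Type} [BEq α] (p : α → Bool) :
    ∀ (l : List α) (r : List α),
      l.foldl (fun r x => if p x then PySem.Set.add r x else r) r
        = (l.filter p).foldl PySem.Set.add r := by
  intro l
  induction l with
  | nil => intro r; rfl
  | cons x xs ih =>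
      intro r
      by_cases hx : p x = true
      · simp [hx, ih]
      · simp [hx, ih]

-- filtering commutes with Python's set(·) dedup
lemma filter_ofList {α : Type} [BEq α] [LawfulBEq α] (p : α → Bool) :
    ∀ (l : List α), (PySem.Set.ofList l).filter p = PySem.Set.ofList (l.filter p) := by
  intro l
  induction l with
  | nil => rfl
  | cons x xs ih =>
      rw [PySem.Set.ofList_cons]
      by_cases hx : p x = true
      · simp [hx, PySem.Set.ofList_cons, ← ih, PySem.Set.discard,
          List.filter_filter]
        apply List.filter_congr
        intro y _
        by_cases hyx : y = x <;> simp [hyx, hx, Bool.and_comm]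
      · simp [hx, ← ih, PySem.Set.discard, List.filter_filter]
        apply List.filter_congr
        intro y _
        by_cases hyx : y = x
        · subst hyx; simp [hx]
        · simp [hyx]

-- discarding c from set(l) is set(l with c's occurrences dropped)
lemma discard_ofList {α : Type} [BEq α] [LawfulBEq α] (c : α) (l : List α) :
    PySem.Set.discard (PySem.Set.ofList l) c
      = PySem.Set.ofList (l.filter (fun y => !(y == c))) := by
  rw [PySem.Set.discard, filter_ofList]

-- loop invariant of B's single pass: after consuming p the dict is Counter(p)
-- and the set holds exactly the chars of p with running count < k, in
-- first-occurrence order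
lemma pass_inv (k : Int) :
    ∀ (p : List String),
      p.foldl
        (fun (st : PySem.Dict String Int × List String) c =>
          (st.1.insert c (st.1.getD c 0 + 1),
           if st.1.getD c 0 + 1 < k then PySem.Set.add st.2 c else PySem.Set.discard st.2 c))
        (PySem.Dict.empty, [])
      = (PySem.Dict.counter p,
         PySem.Set.ofList (p.filter (fun x => decide ((p.count x : Int) < k)))) := by
  intro p
  induction p using List.reverseRecOn with
  | nil => rfl
  | append_singleton p c ih =>
      rw [List.foldl_append, ih]
      simp only [List.foldl_cons, List.foldl_nil]
      have hd : PySem.Dict.counter (p ++ [c])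
          = (PySem.Dict.counter p).insert c ((PySem.Dict.counter p).getD c 0 + 1) := by
        conv_lhs => rw [← PySem.Dict.foldl_insert_getD_add_one_eq_counter]
        rw [List.foldl_append, PySem.Dict.foldl_insert_getD_add_one_eq_counter]
        simp
      have hgd : (PySem.Dict.counter p).getD c 0 = (p.count c : Int) :=
        PySem.Dict.getD_counter p c
      have hcnt : (p ++ [c]).count c = p.count c + 1 := by simp
      have hcnt' : ∀ y, y ≠ c → (p ++ [c]).count y = p.count y := by
        intro y hy
        simp [List.count_append, List.count_singleton]
        exact fun h => hy h.symm
      by_cases h : (p.count c : Int) + 1 < k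
      · have hpc : ((p ++ [c]).count c : Int) < k := by rw [hcnt]; push_cast; omega
        have hfc : ∀ x ∈ p,
            decide ((p.count x : Int) < k)
              = decide (((p ++ [c]).count x : Int) < k) := by
          intro x _
          by_cases hx : x = c
          · rw [hx, hcnt, decide_eq_decide]
            push_cast
            omega
          · rw [hcnt' x hx]
        refine Prod.ext ?_ ?_
        · simp only [hd, hgd]
        · simp only [hgd, if_pos h]
          rw [List.filter_congr hfc]
          have : (p ++ [c]).filter (fun x => decide (((p ++ [c]).count x : Int) < k))
              = p.filter (fun x => decide (((p ++ [c]).count x : Int) < k)) ++ [c] := by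
            simp [List.filter_append, h]
          rw [this, PySem.Set.ofList_append_singleton]
      · have hpc : ¬ ((p ++ [c]).count c : Int) < k := by rw [hcnt]; push_cast; omega
        refine Prod.ext ?_ ?_
        · simp only [hd, hgd]
        · simp only [hgd, if_neg h]
          rw [discard_ofList, List.filter_filter]
          have hfc : ∀ x ∈ p,
              (!(x == c) && decide ((p.count x : Int) < k))
                = decide (((p ++ [c]).count x : Int) < k) := by
            intro x _
            by_cases hx : x = c
            · rw [hx, hcnt]
              simp
              omega
            · rw [hcnt' x hx]; simp [hx]
          rw [List.filter_congr hfc]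
          have : (p ++ [c]).filter (fun x => decide (((p ++ [c]).count x : Int) < k))
              = p.filter (fun x => decide (((p ++ [c]).count x : Int) < k)) := by
            simp [List.filter_append]
            omega
          rw [this]

-- ===== VERDICT (by name: the statement is the Claim_ definition above) =====
theorem get_bad_char_set_py_spec : Claim_equal_get_bad_char_set_py := by
  intro s k _
  unfold Spec_get_bad_char_set_py get_bad_char_set_py get_bad_char_set_py_alt
  set cs := s.toList.map Char.toString with hcs
  -- A's frequency loop is Counter(cs); its items scan filters set(cs) by count < k
  rw [PySem.Dict.foldl_insert_getD_add_one_eq_counter]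
  dsimp only
  rw [PySem.Dict.items_counter, List.foldl_map]
  have hstep :
      (fun (r : List String) (key : String) =>
          if (cs.count key : Int) < k then PySem.Set.add r key else r)
        = (fun r key =>
            if (fun key => decide ((cs.count key : Int) < k)) key then PySem.Set.add r key else r) := by
    funext r key
    by_cases h : (cs.count key : Int) < k <;> simp [h]
  rw [hstep, foldl_if_add]
  simp only [PySem.Set.empty]
  rw [← PySem.Set.ofList_eq_foldl, filter_ofList, PySem.Set.ofList_ofList]
  -- B's single pass produces the same filtered first-occurrence list
  rw [pass_inv]
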